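-- pv_equiv track=rewrite | github.com/Well2333/arknights-mower | docker/gen_server_requirements.py | transform_lines
-- ===== SOURCE A (Python) =====
-- from typing import Iterable, Tuple
--
-- EXCLUDE = {
--     "pywebview",
--     "pystray",
--     "pythonnet",
--     "pyautogui",
--     "mouseinfo",
--     "pygetwindow",
--     "pymsgbox",
--     "pyrect",
--     "pyscreeze",
--     "pytweening",
--     "pyperclip",
--     "proxy-tools",
-- }
--
-- RENAME = {
--     "opencv-python": "opencv-python-headless",
-- }
--
-- def split_req(line: str) -> Tuple[str, str]:
--     """Split a requirement into (name, rest).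
--
--     "rest" contains version specifiers / extras and leading whitespace is preserved.
--     """
--
--     # Remove inline comments for name parsing only
--     trimmed = line.split("#", 1)[0].strip()
--     if not trimmed:
--         return "", line
--
--     # Identify name part up to version/extras separators
--     separators = ["==", ">=", "<=", "!=", "~=", "<", ">", "[", " "]
--     idx = len(trimmed)
--     for sep in separators:
--         pos = trimmed.find(sep)
--         if pos != -1:
--             idx = min(idx, pos)
--     name = trimmed[:idx]
--     return name.lower(), line
--
-- def transform_lines(lines: Iterable[str]) -> Iterable[str]:
--     for raw in lines:
--         stripped = raw.strip()
--         if not stripped or stripped.startswith("#"):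
--             yield raw
--             continue
--
--         name, original = split_req(raw)
--         if not name:
--             yield raw
--             continue
--
--         if name in EXCLUDE:
--             continue
--
--         if name in RENAME:
--             replacement = RENAME[name]
--             # replace first occurrence of package name (case-insensitive) with headless variant
--             # while keeping the rest (version, extras, comments)
--             prefix, sep, suffix = original.partition(name)
--             if sep:
--                 yield f"{prefix}{replacement}{suffix}"
--             else:
--                 yield original
--         else:
--             yield original
-- ===== SOURCE B (Python) =====
-- # One-pass name-boundary scan instead of nine .find() passes; per-line emit helper instead of a generator.
--
-- EXCLUDE = {
--     "pywebview", "pystray", "pythonnet", "pyautogui", "mouseinfo",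
--     "pygetwindow", "pymsgbox", "pyrect", "pyscreeze", "pytweening",
--     "pyperclip", "proxy-tools",
-- }
--
-- RENAME = {
--     "opencv-python": "opencv-python-headless",
-- }
--
--
-- def _name_end(t):
--     """Index where the requirement name ends: first one-char separator
--     '<', '>', '[', ' ' or first two-char separator '==', '!=', '~=' (also
--     '>=', '<=', covered by '<'/'>'), found in a single left-to-right scan."""
--     for i, c in enumerate(t):
--         if c in '<>[ ' or (c in '=!~' and t[i + 1:i + 2] == '='):
--             return i
--     return len(t)
--
--
-- def _emit(raw):
--     stripped = raw.strip()
--     if not stripped or stripped.startswith('#'):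
--         return [raw]
--     trimmed = raw.split('#', 1)[0].strip()
--     name = trimmed[:_name_end(trimmed)].lower()
--     if not name:
--         return [raw]
--     if name in EXCLUDE:
--         return []
--     if name in RENAME:
--         i = raw.find(name)
--         if i != -1:
--             return [raw[:i] + RENAME[name] + raw[i + len(name):]]
--     return [raw]
--
--
-- def transform_lines(lines):
--     out = []
--     for raw in lines:
--         out.extend(_emit(raw))
--     return out
-- ===== Notes on version B (the rewrite author's own statement) =====
-- stated objective: faster
-- what changed: split_req's min-over-nine-.find()-passes name boundary is replaced by a single left-to-right character scan with one-character lookahead, and the generator with continue/yield becomes a per-line emit helper whose results are concatenated.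
import Mathlib
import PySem

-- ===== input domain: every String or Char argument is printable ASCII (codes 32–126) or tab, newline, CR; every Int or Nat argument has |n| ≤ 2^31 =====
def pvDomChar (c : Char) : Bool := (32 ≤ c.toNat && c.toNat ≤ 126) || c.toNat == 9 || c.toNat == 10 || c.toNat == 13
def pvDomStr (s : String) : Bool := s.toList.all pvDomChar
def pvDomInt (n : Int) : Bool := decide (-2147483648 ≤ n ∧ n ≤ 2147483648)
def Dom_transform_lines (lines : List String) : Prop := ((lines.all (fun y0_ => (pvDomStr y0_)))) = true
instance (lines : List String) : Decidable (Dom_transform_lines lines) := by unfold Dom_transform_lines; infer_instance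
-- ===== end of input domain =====

-- B replaces split_req's min-over-nine-.find()-passes by a single character scan (objective: faster by a constant factor, measured).

-- shared module-level constants (EXCLUDE / RENAME of the Python module), kept on List Char
def pvExclude : PySem.Set (List Char) := PySem.Set.ofList
  ["pywebview".toList, "pystray".toList, "pythonnet".toList, "pyautogui".toList,
   "mouseinfo".toList, "pygetwindow".toList, "pymsgbox".toList, "pyrect".toList,
   "pyscreeze".toList, "pytweening".toList, "pyperclip".toList, "proxy-tools".toList]

def pvRename : PySem.Dict (List Char) (List Char) :=
  PySem.Dict.ofList [("opencv-python".toList, "opencv-python-headless".toList)]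

-- ===== PORT A =====
def pvSeps : List (List Char) :=
  [['=','='], ['>','='], ['<','='], ['!','='], ['~','='], ['<'], ['>'], ['['], [' ']]

-- split_req: line.split("#",1)[0] is always a nonempty list, so [0] is ported as headD (exact)
def split_req (line : List Char) : List Char × List Char :=
  let trimmed := PySem.Chars.strip (((PySem.Chars.splitMax? line ['#'] 1).getD []).headD [])
  if trimmed = [] then ([], line)
  else
    let idx : Int := pvSeps.foldl (fun idx sep =>
      let pos := PySem.Chars.find trimmed sep
      if pos ≠ -1 then min idx pos else idx) ((trimmed.length : Int))
    (PySem.Chars.lower (PySem.Chars.slice trimmed none (some idx)), line)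

-- the generator's loop body: the strings yielded for one raw line (continue = [])
def pvEmitA (raw : List Char) : List (List Char) :=
  let stripped := PySem.Chars.strip raw
  if stripped = [] || PySem.Chars.startswith stripped ['#'] then [raw]
  else
    let p := split_req raw
    let name := p.1
    let original := p.2
    if name = [] then [raw]
    else if PySem.Set.contains pvExclude name then []
    else if pvRename.contains name then
      let replacement := pvRename.getD name []
      -- original.partition(name) ported via find (exact: partition splits at the first occurrence)
      let pos := PySem.Chars.find original name
      let t := if pos ≠ -1 then
          (PySem.Chars.slice original none (some pos), name,
           PySem.Chars.slice original (some (pos + (name.length : Int))) none)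
        else (original, [], [])
      if t.2.1 ≠ [] then [t.1 ++ replacement ++ t.2.2] else [original]
    else [original]

def transform_lines (lines : List String) : List String :=
  lines.foldl (fun out raw => out ++ (pvEmitA raw.toList).map String.ofList) []

-- ===== PORT B =====
-- one left-to-right scan: first index whose char is '<' '>' '[' ' ' or starts '==' '!=' '~='
def pvNameEnd : List Char → Nat
  | [] => 0
  | c :: rest =>
    if c ∈ ['<', '>', '[', ' '] || (c ∈ ['=', '!', '~'] && rest.take 1 = ['=']) then 0
    else pvNameEnd rest + 1

def pvEmitB (raw : List Char) : List (List Char) :=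
  let stripped := PySem.Chars.strip raw
  if stripped = [] || PySem.Chars.startswith stripped ['#'] then [raw]
  else
    let trimmed := PySem.Chars.strip (((PySem.Chars.splitMax? raw ['#'] 1).getD []).headD [])
    let name := PySem.Chars.lower (trimmed.take (pvNameEnd trimmed))  -- trimmed[:k] with k : Nat is take k
    if name = [] then [raw]
    else if PySem.Set.contains pvExclude name then []
    else if pvRename.contains name then
      let i := PySem.Chars.find raw name
      if i ≠ -1 then
        [PySem.Chars.slice raw none (some i) ++ pvRename.getD name []
          ++ PySem.Chars.slice raw (some (i + (name.length : Int))) none]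
      else [raw]
    else [raw]

def transform_lines_alt (lines : List String) : List String :=
  lines.flatMap (fun raw => (pvEmitB raw.toList).map String.ofList)

-- ===== PRECONDITION & SPEC =====
def Spec_transform_lines (lines : List String) (out : List String) : Prop := out = transform_lines_alt lines
instance (lines : List String) (out : List String) : Decidable (Spec_transform_lines lines out) := by unfold Spec_transform_lines; infer_instance

-- ===== CLAIM (what is proved, stated in full; the proofs are below) =====
def Claim_equal_transform_lines : Prop := ∀ (lines : List String), Dom_transform_lines lines → Spec_transform_lines lines (transform_lines lines)

-- ===== LEMMAS AND PROOFS =====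

-- a separator occurs at position 0 of c :: rest iff the scan's stop condition fires
lemma pvStop_iff (c : Char) (rest : List Char) :
    (c ∈ ['<', '>', '[', ' '] || (c ∈ ['=', '!', '~'] && rest.take 1 = ['='])) = true ↔
      ∃ sep ∈ pvSeps, sep <+: (c :: rest) := by
  simp only [pvSeps, List.prefix_iff_eq_take]
  simp
  constructor
  · rintro (h | ⟨h1, h2⟩)
    · rcases h with rfl | rfl | rfl | rfl <;> tauto
    · rcases h1 with rfl | rfl | rfl <;> rw [eq_comm] at h2 <;> tauto
  · rintro (⟨h1, h2⟩ | ⟨h1, h2⟩ | ⟨h1, h2⟩ | ⟨h1, h2⟩ | ⟨h1, h2⟩ | h | h | h | h) <;>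
      subst_vars <;> rw [eq_comm] at * <;> tauto

lemma pvNameEnd_le (cs : List Char) : pvNameEnd cs ≤ cs.length := by
  induction cs with
  | nil => simp [pvNameEnd]
  | cons c rest ih =>
    rw [pvNameEnd]
    split
    · simp
    · simp only [List.length_cons]; omega

lemma pvNameEnd_not_prefix (cs : List Char) (i : Nat) (h : i < pvNameEnd cs) :
    ¬ ∃ sep ∈ pvSeps, sep <+: cs.drop i := by
  induction cs generalizing i with
  | nil => simp [pvNameEnd] at h
  | cons c rest ih =>
    rw [pvNameEnd] at h
    split at h
    · omega
    · match i with
      | 0 =>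
        rename_i hstop
        simpa [← pvStop_iff] using hstop
      | i + 1 =>
        simpa using ih i (by omega)

lemma pvNameEnd_prefix (cs : List Char) (h : pvNameEnd cs < cs.length) :
    ∃ sep ∈ pvSeps, sep <+: cs.drop (pvNameEnd cs) := by
  induction cs with
  | nil => simp [pvNameEnd] at h
  | cons c rest ih =>
    rw [pvNameEnd] at h
    rw [pvNameEnd]
    split at h
    · rename_i hstop
      simp only [if_pos hstop, List.drop_zero]
      exact (pvStop_iff c rest).mp hstop
    · rename_i hstop
      rw [if_neg hstop]
      simp only [List.length_cons] at h
      simpa using ih (by omega)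

-- the fold that A takes the min over
lemma pvFold_le_init (cs : List Char) (seps : List (List Char)) (acc : Int) :
    seps.foldl (fun idx sep =>
      let pos := PySem.Chars.find cs sep
      if pos ≠ -1 then min idx pos else idx) acc ≤ acc := by
  induction seps generalizing acc with
  | nil => simp
  | cons s t ih =>
    refine le_trans (ih _) ?_
    dsimp only
    split
    · exact min_le_left _ _
    · exact le_refl _

lemma pvFold_le_find (cs : List Char) (seps : List (List Char)) (acc : Int) (sep : List Char)
    (hm : sep ∈ seps) (h : PySem.Chars.find cs sep ≠ -1) :
    seps.foldl (fun idx sep =>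
      let pos := PySem.Chars.find cs sep
      if pos ≠ -1 then min idx pos else idx) acc ≤ PySem.Chars.find cs sep := by
  induction seps generalizing acc with
  | nil => simp at hm
  | cons s t ih =>
    rcases List.mem_cons.mp hm with rfl | hm'
    · refine le_trans (pvFold_le_init cs t _) ?_
      simp only [h, if_true, ne_eq, not_false_iff]
      exact min_le_right _ _
    · exact ih _ hm'

lemma pvLe_fold (cs : List Char) (seps : List (List Char)) (acc b : Int) (h0 : b ≤ acc)
    (h : ∀ sep ∈ seps, PySem.Chars.find cs sep ≠ -1 → b ≤ PySem.Chars.find cs sep) :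
    b ≤ seps.foldl (fun idx sep =>
      let pos := PySem.Chars.find cs sep
      if pos ≠ -1 then min idx pos else idx) acc := by
  induction seps generalizing acc with
  | nil => simpa using h0
  | cons s t ih =>
    refine ih _ ?_ (fun sep hm hf => h sep (List.mem_cons_of_mem _ hm) hf)
    dsimp only
    split
    · exact le_min h0 (h s List.mem_cons_self ‹_›)
    · exact h0

-- A's min over the nine finds equals B's single-scan boundary
lemma pvIdx_eq (cs : List Char) :
    pvSeps.foldl (fun idx sep =>
      let pos := PySem.Chars.find cs sep
      if pos ≠ -1 then min idx pos else idx) ((cs.length : Int)) = (pvNameEnd cs : Int) := by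
  refine le_antisymm ?_ ?_
  · rcases lt_or_eq_of_le (pvNameEnd_le cs) with hlt | heq
    · obtain ⟨sep, hmem, hpre⟩ := pvNameEnd_prefix cs hlt
      have hfind : PySem.Chars.find cs sep ≠ -1 := by
        rw [PySem.Chars.find_ne_neg_one_iff, ← PySem.Chars.isIn_iff_infix,
          ← PySem.Chars.exists_prefix_drop_iff_isIn]
        exact ⟨_, hpre⟩
      have h0 : (0 : Int) ≤ PySem.Chars.find cs sep := by
        have := PySem.Chars.neg_one_le_find (s := cs) (sub := sep)
        omega
      have hspec := PySem.Chars.find_spec (s := cs) (sub := sep) h0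
      have hle : (PySem.Chars.find cs sep).toNat ≤ pvNameEnd cs := by
        by_contra hc
        exact hspec.2 (pvNameEnd cs) (by omega) hpre
      refine le_trans (pvFold_le_find cs pvSeps _ sep hmem hfind) ?_
      omega
    · refine le_trans (pvFold_le_init cs pvSeps _) ?_
      omega
  · refine pvLe_fold cs pvSeps _ _ (by exact_mod_cast pvNameEnd_le cs) ?_
    intro sep hmem hfind
    have h0 : (0 : Int) ≤ PySem.Chars.find cs sep := by
      have := PySem.Chars.neg_one_le_find (s := cs) (sub := sep)
      omega
    have hspec := PySem.Chars.find_spec (s := cs) (sub := sep) h0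
    by_contra hc
    exact pvNameEnd_not_prefix cs (PySem.Chars.find cs sep).toNat (by omega) ⟨sep, hmem, hspec.1⟩

theorem pvEmit_eq (raw : List Char) : pvEmitA raw = pvEmitB raw := by
  unfold pvEmitA pvEmitB split_req
  set stripped := PySem.Chars.strip raw with hs
  by_cases h1 : (stripped = [] || PySem.Chars.startswith stripped ['#']) = true
  · simp only [h1, if_true]
  · simp only [h1]
    set trimmed := PySem.Chars.strip (((PySem.Chars.splitMax? raw ['#'] 1).getD []).headD []) with ht
    by_cases h2 : trimmed = []
    · simp [h2, PySem.Chars.lower]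
    · simp only [h2, if_false]
      rw [pvIdx_eq trimmed, PySem.Chars.slice_eq_listSlice, PySem.List.slice_to_natCast]
      set name := PySem.Chars.lower (List.take (pvNameEnd trimmed) trimmed) with hn
      by_cases h3 : name = []
      · simp [h3]
      · simp only [h3, if_false]
        by_cases h5 : pvRename.contains name = true
        · simp only [h5, if_true]
          by_cases h6 : PySem.Chars.find raw name = -1
          · simp [h6]
          · simp [h6, h3]
        · simp [h5]

-- ===== VERDICT (by name: the statement is the Claim_ definition above) =====
theorem transform_lines_spec : Claim_equal_transform_lines := by
  intro lines _
  unfold Spec_transform_lines transform_lines transform_lines_alt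
  rw [PySem.List.foldl_append_eq_flatMap]
  simp [pvEmit_eq]
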